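-- pv_equiv track=rewrite | github.com/lloydlegaspi/Taskify-DAA-Project | pages/3_View.py | sort_tasks
-- ===== SOURCE A (Python) =====
-- def merge_sort(tasks, key):
--     if len(tasks) <= 1: # Base case: if the length of the list is less than or equal to 1, return the list
--         return tasks
--
--     mid = len(tasks) // 2 # Find the middle of the list
--     left_half = merge_sort(tasks[:mid], key) # Recursively sort the left half
--     right_half = merge_sort(tasks[mid:], key) # Recursively sort the right half
--
--     return merge(left_half, right_half, key) # Merge the sorted halves
--
-- def merge(left, right, key):
--     sorted_list = [] # Initialize an empty list to store the sorted elements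
--     i = j = 0 # Initialize pointers for left and right lists
--
--     while i < len(left) and j < len(right): # Compare elements from both lists and append the smaller element to the sorted list
--         if left[i][key] < right[j][key]: # If the element in the left list is smaller, append it to the sorted list
--             sorted_list.append(left[i])
--             i += 1
--         elif left[i][key] > right[j][key]: # If the element in the right list is smaller, append it to the sorted list
--             sorted_list.append(right[j])
--             j += 1
--         else:
--             sorted_list.append(left[i]) # If the elements are equal, append the element from the left list
--             i += 1
--
--     while i < len(left): # Append the remaining elements from the left list to the sorted list
--         sorted_list.append(left[i])
--         i += 1
--
--     while j < len(right): # Append the remaining elements from the right list to the sorted list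
--         sorted_list.append(right[j])
--         j += 1
--
--     return sorted_list
--
-- def sort_tasks(tasks):
--     tasks = merge_sort(tasks, 'due_date') # Sort tasks by due date
--     start = 0 # Initialize the start index
--
--     while start < len(tasks): # Iterate through the sorted tasks
--         end = start
--         while end < len(tasks) and tasks[end]['due_date'] == tasks[start]['due_date']: # Find the end index of tasks with the same due date
--             end += 1
--
--         if end - start > 1: # If there are multiple tasks with the same due date, sort them by priority
--             tasks[start:end] = merge_sort(tasks[start:end], 'priority')
--
--         start = end # Move the start index to the next due date
--
--     return tasks
-- ===== SOURCE B (Python) =====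
-- def sort_tasks(tasks):
--     # One stable sort on the composite key (due_date, priority); 'priority' defaults to ''
--     # so a task missing it is still sortable (it only matters inside equal-due_date runs,
--     # where A requires it anyway). Returns a new list; the argument is not mutated.
--     return sorted(tasks, key=lambda t: (t['due_date'], t.get('priority', '')))
-- ===== Notes on version B (the rewrite author's own statement) =====
-- stated objective: simpler
-- what changed: A's hand-written merge sort by due_date followed by an index/slice loop that re-sorts every equal-due_date run by priority is replaced by one built-in stable sort on the composite key (due_date, priority-with-default).
import Mathlib
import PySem

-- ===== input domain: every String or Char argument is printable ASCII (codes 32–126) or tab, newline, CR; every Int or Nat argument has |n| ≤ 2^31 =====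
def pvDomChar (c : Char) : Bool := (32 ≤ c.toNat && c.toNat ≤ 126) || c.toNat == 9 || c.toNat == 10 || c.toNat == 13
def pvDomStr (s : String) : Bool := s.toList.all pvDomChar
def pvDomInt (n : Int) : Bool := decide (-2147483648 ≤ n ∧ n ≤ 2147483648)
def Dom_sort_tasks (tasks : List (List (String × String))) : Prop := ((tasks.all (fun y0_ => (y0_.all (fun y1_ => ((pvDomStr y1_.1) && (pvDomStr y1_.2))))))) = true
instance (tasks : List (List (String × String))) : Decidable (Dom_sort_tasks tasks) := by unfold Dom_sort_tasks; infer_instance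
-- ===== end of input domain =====

-- B replaces A's hand-written merge sort by due_date plus the index/slice loop that re-sorts every
-- equal-due_date run by priority with ONE stable sort on the composite key
-- (due_date, priority-with-default-''); objective: simpler. The equality proved is about the
-- return value (A does not observably mutate its argument: the splice happens on the fresh list
-- merge_sort returns whenever len(tasks) > 1, and is never reached when len(tasks) <= 1).

-- ===== PORT A =====

-- t[k] : first-match lookup in the dict (association list); total via getD "" — Pre_ keeps the
-- keys A actually reads present (Python raises KeyError where they are missing).
def pvGet (t : List (String × String)) (k : String) : String := (List.lookup k t).getD ""

def pv_merge (left right : List (List (String × String))) (key : String) :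
    List (List (String × String)) :=
  match left, right with
  | [], r => r
  | a :: l, [] => a :: l
  | a :: l, b :: r =>
    if pvGet a key < pvGet b key then a :: pv_merge (l) (b :: r) key
    else if pvGet a key > pvGet b key then b :: pv_merge (a :: l) (r) key
    else a :: pv_merge (l) (b :: r) key
termination_by left.length + right.length
decreasing_by
· exact Nat.add_lt_add_right (Nat.lt_succ_self _) _
· exact Nat.add_lt_add_left (Nat.lt_succ_self _) _
· exact Nat.add_lt_add_right (Nat.lt_succ_self _) _

theorem pv_arith_take (l : Nat) (h : ¬ l ≤ 1) : min (l / 2) l < l :=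
  Nat.lt_of_le_of_lt (Nat.min_le_left _ _)
    (Nat.div_lt_self (Nat.lt_trans Nat.zero_lt_one (Nat.lt_of_not_le h)) Nat.one_lt_two)

theorem pv_arith_drop (l : Nat) (h : ¬ l ≤ 1) : l - l / 2 < l :=
  Nat.sub_lt (Nat.lt_trans Nat.zero_lt_one (Nat.lt_of_not_le h))
    (Nat.div_pos (Nat.lt_of_not_le h) Nat.zero_lt_two)

theorem pv_ms_dec1 (tasks : List (List (String × String))) (h : ¬ tasks.length ≤ 1) :
    (PySem.List.slice tasks none (some ((tasks.length / 2 : Nat) : Int))).length <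
      tasks.length := by
  rw [PySem.List.slice_to_natCast, List.length_take]
  exact pv_arith_take tasks.length h

theorem pv_ms_dec2 (tasks : List (List (String × String))) (h : ¬ tasks.length ≤ 1) :
    (PySem.List.slice tasks (some ((tasks.length / 2 : Nat) : Int)) none).length <
      tasks.length := by
  rw [PySem.List.slice_from_natCast, List.length_drop]
  exact pv_arith_drop tasks.length h

def pv_merge_sort (tasks : List (List (String × String))) (key : String) :
    List (List (String × String)) :=
  if tasks.length ≤ 1 then tasks
  else
    let mid := tasks.length / 2
    pv_merge (pv_merge_sort (PySem.List.slice tasks none (some (mid : Int))) key)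
             (pv_merge_sort (PySem.List.slice tasks (some (mid : Int)) none) key) key
termination_by tasks.length
decreasing_by
· rename_i h; exact pv_ms_dec1 tasks h
· rename_i h; exact pv_ms_dec2 tasks h

theorem pv_fe_dec (a e : Nat) (h : e < a) : a - (e + 1) < a - e :=
  Nat.sub_succ_lt_self a e h

def pv_findEnd (tasks : List (List (String × String))) (start e : Nat) : Nat :=
  if h : e < tasks.length ∧ pvGet (tasks.getD e []) "due_date" = pvGet (tasks.getD start []) "due_date" then
    pv_findEnd tasks start (e + 1)
  else e
termination_by tasks.length - e
decreasing_by exact pv_fe_dec _ _ h.1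

-- "tasks[start:end] = merge_sort(tasks[start:end], 'priority')" as a take/slice/drop splice
-- (exact: the replacement has exactly the slice's length)
def pv_spliceSorted (tasks : List (List (String × String))) (start e : Nat) :
    List (List (String × String)) :=
  List.take start tasks ++
    pv_merge_sort (PySem.List.slice tasks (some (start : Int)) (some (e : Int))) "priority" ++
    List.drop e tasks

-- the outer while loop; fuel = the list's length makes the recursion structural (each pass moves
-- start to the strictly larger end index and the splice preserves the length, so the fuel is
-- never exhausted — the equivalence theorem below establishes the loop's full behaviour)
def pv_groupLoop (fuel : Nat) (tasks : List (List (String × String))) (start : Nat) :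
    List (List (String × String)) :=
  match fuel with
  | 0 => tasks
  | fuel + 1 =>
    if start < tasks.length then
      let e := pv_findEnd tasks start start
      pv_groupLoop fuel (if 1 < e - start then pv_spliceSorted tasks start e else tasks) e
    else tasks
def sort_tasks (tasks : List (List (String × String))) : List (List (String × String)) :=
  let s := pv_merge_sort tasks "due_date"
  pv_groupLoop s.length s 0

-- ===== PORT B =====

-- sorted(tasks, key=lambda t: (t['due_date'], t.get('priority', '')))
def sort_tasks_alt (tasks : List (List (String × String))) : List (List (String × String)) :=
  PySem.List.sorted2 tasks (fun t => (List.lookup "due_date" t).getD "")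
    (fun t => (List.lookup "priority" t).getD "")

-- ===== PRECONDITION & SPEC =====

-- Pre_ excludes exactly the inputs on which Python A raises KeyError: a task missing the
-- 'due_date' key in a non-empty list, or a task missing 'priority' while sharing its due_date
-- with another task (A re-sorts that equal-due_date run by 'priority'). B returns A's value on
-- every input A returns on.
def Pre_sort_tasks (tasks : List (List (String × String))) : Prop :=
  (∀ t ∈ tasks, (List.lookup "due_date" t).isSome = true) ∧
  tasks.Pairwise (fun a b =>
    (List.lookup "due_date" a).getD "" = (List.lookup "due_date" b).getD "" →
      (List.lookup "priority" a).isSome = true ∧ (List.lookup "priority" b).isSome = true)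

instance (tasks : List (List (String × String))) : Decidable (Pre_sort_tasks tasks) := by
  unfold Pre_sort_tasks; infer_instance

def pvWitness_sort_tasks : (List (List (String × String))) :=
  [[("due_date", "2024-06-01"), ("priority", "2"), ("title", "b")],
   [("due_date", "2024-06-01"), ("priority", "1")],
   [("due_date", "2024-01-01")]]

def Spec_sort_tasks (tasks : List (List (String × String))) (out : List (List (String × String))) : Prop :=
  out = sort_tasks_alt tasks
instance (tasks : List (List (String × String))) (out : List (List (String × String))) :
    Decidable (Spec_sort_tasks tasks out) := by unfold Spec_sort_tasks; infer_instance

-- ===== CLAIM (what is proved, stated in full; the proofs are below) =====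
def Claim_equal_sort_tasks : Prop := ∀ (tasks : List (List (String × String))),
  Dom_sort_tasks tasks → Pre_sort_tasks tasks → Spec_sort_tasks tasks (sort_tasks tasks)

-- ===== LEMMAS AND PROOFS =====

theorem pv_merge_length (left right : List (List (String × String))) (key : String) :
    (pv_merge left right key).length = left.length + right.length := by
  fun_induction pv_merge with
  | case1 => exact (Nat.zero_add _).symm
  | case2 => exact (Nat.add_zero _).symm
  | case3 a l b r h ih =>
      rw [List.length_cons, ih, List.length_cons]
      exact Nat.add_right_comm _ _ _
  | case4 a l b r h h2 ih =>
      rw [List.length_cons, ih, List.length_cons]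
      exact Nat.add_assoc _ _ _
  | case5 a l b r h h2 ih =>
      rw [List.length_cons, ih, List.length_cons]
      exact Nat.add_right_comm _ _ _

theorem pv_arith_halves (l : Nat) : min (l / 2) l + (l - l / 2) = l := by
  rw [Nat.min_eq_left (Nat.div_le_self _ _), Nat.add_sub_cancel' (Nat.div_le_self _ _)]

theorem pv_merge_sort_length (tasks : List (List (String × String))) (key : String) :
    (pv_merge_sort tasks key).length = tasks.length := by
  fun_induction pv_merge_sort with
  | case1 => rfl
  | case2 tasks h mid ihl ihr =>
      rw [pv_merge_length, ihl, ihr, PySem.List.slice_to_natCast,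
        PySem.List.slice_from_natCast, List.length_take, List.length_drop]
      exact pv_arith_halves tasks.length


-- the composite (lexicographic) sort key of B
def pvK2 (t : List (String × String)) : Lex (String × String) :=
  toLex (pvGet t "due_date", pvGet t "priority")

-- pv_merge is a stable merge:
theorem pv_merge_perm (left right : List (List (String × String))) (key : String) :
    (pv_merge left right key).Perm (left ++ right) := by
  fun_induction pv_merge with
  | case1 => exact List.Perm.refl _
  | case2 => rw [List.append_nil]
  | case3 a l b r h ih => exact ih.cons a
  | case4 a l b r h h2 ih => exact (ih.cons b).trans List.perm_middle.symm
  | case5 a l b r h h2 ih => exact ih.cons a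

theorem pv_merge_sort_perm (tasks : List (List (String × String))) (key : String) :
    (pv_merge_sort tasks key).Perm tasks := by
  fun_induction pv_merge_sort with
  | case1 => exact List.Perm.refl _
  | case2 tasks h mid ihl ihr =>
      refine (pv_merge_perm _ _ _).trans ?_
      refine (ihl.append ihr).trans ?_
      rw [PySem.List.slice_to_natCast, PySem.List.slice_from_natCast, List.take_append_drop]

-- merge membership / sortedness / stability on sorted halves
theorem pv_merge_mem (left right : List (List (String × String))) (key : String)
    (x : List (String × String)) :
    x ∈ pv_merge left right key ↔ x ∈ left ∨ x ∈ right := by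
  rw [(pv_merge_perm left right key).mem_iff, List.mem_append]

theorem pv_merge_pairwise (left right : List (List (String × String))) (key : String)
    (hl : left.Pairwise (fun a b => pvGet a key ≤ pvGet b key))
    (hr : right.Pairwise (fun a b => pvGet a key ≤ pvGet b key)) :
    (pv_merge left right key).Pairwise (fun a b => pvGet a key ≤ pvGet b key) := by
  fun_induction pv_merge with
  | case1 => exact hr
  | case2 => exact hl
  | case3 a l b r h ih =>
      rw [List.pairwise_cons] at hl ⊢
      refine ⟨?_, ih hl.2 hr⟩
      intro y hy
      rcases (pv_merge_mem _ _ _ _).1 hy with hy | hy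
      · exact hl.1 y hy
      · rcases List.mem_cons.1 hy with hy | hy
        · exact le_of_lt (by simpa [hy] using h)
        · exact le_trans (le_of_lt h) ((List.pairwise_cons.1 hr).1 y hy)
  | case4 a l b r h h2 ih =>
      rw [List.pairwise_cons] at hr ⊢
      refine ⟨?_, ih hl hr.2⟩
      intro y hy
      rcases (pv_merge_mem _ _ _ _).1 hy with hy | hy
      · rcases List.mem_cons.1 hy with hy | hy
        · exact le_of_lt (by simpa [hy] using h2)
        · exact le_trans (le_of_lt h2) ((List.pairwise_cons.1 hl).1 y hy)
      · exact hr.1 y hy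
  | case5 a l b r h h2 ih =>
      have hab : pvGet a key = pvGet b key := le_antisymm (not_lt.1 h2) (not_lt.1 h)
      rw [List.pairwise_cons] at hl ⊢
      refine ⟨?_, ih hl.2 hr⟩
      intro y hy
      rcases (pv_merge_mem _ _ _ _).1 hy with hy | hy
      · exact hl.1 y hy
      · rcases List.mem_cons.1 hy with hy | hy
        · exact le_of_eq (by rw [hy, hab])
        · exact hab.le.trans ((List.pairwise_cons.1 hr).1 y hy)

theorem pv_merge_filter (left right : List (List (String × String))) (key : String)
    (P : List (String × String) → Bool) (c : String)
    (hP : ∀ x, P x = true → pvGet x key = c)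
    (hl : left.Pairwise (fun a b => pvGet a key ≤ pvGet b key))
    (hr : right.Pairwise (fun a b => pvGet a key ≤ pvGet b key)) :
    (pv_merge left right key).filter P = left.filter P ++ right.filter P := by
  fun_induction pv_merge with
  | case1 => simp
  | case2 => simp
  | case3 a l b r h ih =>
      rw [List.pairwise_cons] at hl
      simp only [List.filter_cons, ih hl.2 hr]
      split <;> simp
  | case4 a l b r h h2 ih =>
      rw [List.pairwise_cons] at hr
      have ihe := ih hl hr.2
      by_cases hb : P b = true
      · have hfa : (a :: l).filter P = [] := by
          rw [List.filter_eq_nil_iff]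
          intro y hy hPy
          have hyk : pvGet y key = c := hP y hPy
          have hbk : pvGet b key = c := hP b hb
          have hay : pvGet a key ≤ pvGet y key := by
            rcases List.mem_cons.1 hy with hy | hy
            · simp [hy]
            · exact (List.pairwise_cons.1 hl).1 y hy
          have : pvGet b key < pvGet y key := lt_of_lt_of_le h2 hay
          rw [hyk, hbk] at this
          exact lt_irrefl _ this
        rw [List.filter_cons_of_pos hb, ihe, hfa, List.filter_cons_of_pos hb]
        simp
      · rw [List.filter_cons_of_neg (by simp [hb]), ihe,
          show List.filter P (b :: r) = List.filter P r from List.filter_cons_of_neg (by simp [hb])]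
  | case5 a l b r h h2 ih =>
      rw [List.pairwise_cons] at hl
      simp only [List.filter_cons, ih hl.2 hr]
      split <;> simp

theorem pv_merge_sort_pairwise (tasks : List (List (String × String))) (key : String) :
    (pv_merge_sort tasks key).Pairwise (fun a b => pvGet a key ≤ pvGet b key) := by
  fun_induction pv_merge_sort with
  | case1 tasks h =>
      match tasks, h with
      | [], _ => exact List.Pairwise.nil
      | [t], _ => exact List.pairwise_singleton _ _
  | case2 tasks h mid ihl ihr => exact pv_merge_pairwise _ _ _ ihl ihr

theorem pv_merge_sort_filter (tasks : List (List (String × String))) (key : String)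
    (P : List (String × String) → Bool) (c : String)
    (hP : ∀ x, P x = true → pvGet x key = c) :
    (pv_merge_sort tasks key).filter P = tasks.filter P := by
  fun_induction pv_merge_sort with
  | case1 => rfl
  | case2 tasks h mid ihl ihr =>
      rw [pv_merge_filter _ _ _ P c hP (pv_merge_sort_pairwise _ _) (pv_merge_sort_pairwise _ _),
        ihl, ihr, PySem.List.slice_to_natCast, PySem.List.slice_from_natCast,
        ← List.filter_append, List.take_append_drop]

-- a stably sorted list is unique: same multiset, sorted by key, same order inside each key class
theorem pv_stable_unique {α κ : Type} [LinearOrder κ] (k : α → κ) :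
    ∀ (ys zs : List α), ys.Perm zs →
      ys.Pairwise (fun a b => k a ≤ k b) → zs.Pairwise (fun a b => k a ≤ k b) →
      (∀ c : κ, ys.filter (fun x => decide (k x = c)) = zs.filter (fun x => decide (k x = c))) →
      ys = zs := by
  intro ys
  induction ys with
  | nil => intro zs hp _ _ _; exact (hp.nil_eq).symm ▸ rfl
  | cons a ys' ih =>
    intro zs hp hy hz hf
    match zs with
    | [] => exact absurd hp.length_eq (by simp)
    | b :: zs' =>
      have hab : k a = k b := by
        have hbmem : b ∈ a :: ys' := hp.mem_iff.2 (List.mem_cons_self ..)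
        have hamem : a ∈ b :: zs' := hp.mem_iff.1 (List.mem_cons_self ..)
        rcases List.mem_cons.1 hbmem with h1 | h1
        · rw [h1]
        rcases List.mem_cons.1 hamem with h2 | h2
        · rw [h2]
        exact le_antisymm ((List.pairwise_cons.1 hy).1 b h1) ((List.pairwise_cons.1 hz).1 a h2)
      have hfa := hf (k a)
      rw [List.filter_cons_of_pos (by simp), List.filter_cons_of_pos (by simp [hab])] at hfa
      have hae : a = b := (List.cons.injEq _ _ _ _ ▸ hfa).1
      subst hae
      have htails : ∀ c : κ, ys'.filter (fun x => decide (k x = c)) =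
          zs'.filter (fun x => decide (k x = c)) := by
        intro c
        by_cases hc : c = k a
        · subst hc; exact (List.cons.injEq _ _ _ _ ▸ hfa).2
        · have := hf c
          rwa [List.filter_cons_of_neg (by simp; exact fun h => hc h.symm),
            List.filter_cons_of_neg (by simp; exact fun h => hc h.symm)] at this
      rw [ih zs' hp.cons_inv (List.pairwise_cons.1 hy).2 (List.pairwise_cons.1 hz).2 htails]

-- PySem.List.sorted2 is insertion sort via insertBy; the same three properties for it
theorem pv_insertBy_perm {α : Type} (bef : α → α → Bool) (x : α) (ys : List α) :
    (PySem.List.insertBy bef x ys).Perm (x :: ys) := by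
  induction ys with
  | nil => simp [PySem.List.insertBy]
  | cons y ys ih =>
    simp only [PySem.List.insertBy]
    split
    · exact List.Perm.refl _
    · exact (ih.cons y).trans (List.Perm.swap x y ys)

theorem pv_insertBy_pairwise {α κ : Type} [LinearOrder κ] (g : α → κ) (x : α) (ys : List α)
    (hy : ys.Pairwise (fun a b => g a ≤ g b)) :
    (PySem.List.insertBy (fun a b => decide (g a < g b)) x ys).Pairwise
      (fun a b => g a ≤ g b) := by
  induction ys with
  | nil => simp [PySem.List.insertBy]
  | cons y ys ih =>
    rw [List.pairwise_cons] at hy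
    simp only [PySem.List.insertBy]
    split
    · rename_i hlt
      rw [decide_eq_true_iff] at hlt
      refine List.pairwise_cons.2 ⟨?_, List.pairwise_cons.2 hy⟩
      intro z hz
      rcases List.mem_cons.1 hz with hz | hz
      · exact le_of_lt (hz ▸ hlt)
      · exact le_of_lt (lt_of_lt_of_le hlt (hy.1 z hz))
    · rename_i hlt
      rw [decide_eq_true_iff] at hlt
      refine List.pairwise_cons.2 ⟨?_, ih hy.2⟩
      intro z hz
      rcases List.mem_cons.1 ((pv_insertBy_perm _ x ys).mem_iff.1 hz) with hz | hz
      · exact hz ▸ not_lt.1 hlt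
      · exact hy.1 z hz

theorem pv_insertBy_filter {α κ : Type} [LinearOrder κ] (g : α → κ) (x : α) (ys : List α)
    (P : α → Bool) (c : κ) (hP : ∀ a, P a = true → g a = c)
    (hy : ys.Pairwise (fun a b => g a ≤ g b)) :
    (PySem.List.insertBy (fun a b => decide (g a < g b)) x ys).filter P =
      if P x then ys.filter P ++ [x] else ys.filter P := by
  induction ys with
  | nil => simp [PySem.List.insertBy, List.filter_cons]
  | cons y ys ih =>
    rw [List.pairwise_cons] at hy
    simp only [PySem.List.insertBy]
    split
    · rename_i hlt
      rw [decide_eq_true_iff] at hlt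
      by_cases hx : P x = true
      · have hnil : (y :: ys).filter P = [] := by
          rw [List.filter_eq_nil_iff]
          intro z hz hPz
          have : g x < g z := by
            rcases List.mem_cons.1 hz with hz | hz
            · exact hz ▸ hlt
            · exact lt_of_lt_of_le hlt (hy.1 z hz)
          rw [hP z hPz, hP x hx] at this
          exact lt_irrefl _ this
        rw [List.filter_cons_of_pos hx, hnil, if_pos hx]
        simp
      · rw [List.filter_cons_of_neg (by simp [hx]), if_neg hx]
    · rename_i hlt
      by_cases hpy : P y = true
      · rw [List.filter_cons_of_pos hpy, ih hy.2,
          show (y :: ys).filter P = y :: ys.filter P from List.filter_cons_of_pos hpy]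
        split <;> simp
      · rw [List.filter_cons_of_neg (by simp [hpy]), ih hy.2,
          show (y :: ys).filter P = ys.filter P from List.filter_cons_of_neg (by simp [hpy])]

theorem pv_isort_pairwise {α κ : Type} [LinearOrder κ] (g : α → κ) :
    ∀ (xs acc : List α), acc.Pairwise (fun a b => g a ≤ g b) →
      (xs.foldl (fun acc x => PySem.List.insertBy (fun a b => decide (g a < g b)) x acc)
        acc).Pairwise (fun a b => g a ≤ g b) := by
  intro xs
  induction xs with
  | nil => intro acc h; exact h
  | cons x xs ih =>
    intro acc h
    exact ih _ (pv_insertBy_pairwise g x acc h)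

theorem pv_isort_perm {α : Type} (bef : α → α → Bool) :
    ∀ (xs acc : List α),
      (xs.foldl (fun acc x => PySem.List.insertBy bef x acc) acc).Perm (acc ++ xs) := by
  intro xs
  induction xs with
  | nil => simp
  | cons x xs ih =>
    intro acc
    simp only [List.foldl_cons]
    refine (ih _).trans ?_
    refine ((pv_insertBy_perm bef x acc).append_right xs).trans ?_
    exact List.perm_middle.symm

theorem pv_isort_filter {α κ : Type} [LinearOrder κ] (g : α → κ)
    (P : α → Bool) (c : κ) (hP : ∀ a, P a = true → g a = c) :
    ∀ (xs acc : List α), acc.Pairwise (fun a b => g a ≤ g b) →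
      (xs.foldl (fun acc x => PySem.List.insertBy (fun a b => decide (g a < g b)) x acc)
        acc).filter P = acc.filter P ++ xs.filter P := by
  intro xs
  induction xs with
  | nil => intro acc _; simp
  | cons x xs ih =>
    intro acc h
    simp only [List.foldl_cons]
    rw [ih _ (pv_insertBy_pairwise g x acc h), pv_insertBy_filter g x acc P c hP h,
      List.filter_cons]
    split <;> simp

theorem pv_lt_lex_bool {k1 k2 : Type} [LinearOrder k1] [LinearOrder k2]
    (x1 y1 : k1) (x2 y2 : k2) :
    (decide (x1 < y1) || (!decide (y1 < x1) && decide (x2 < y2))) =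
      decide (toLex (x1, x2) < toLex (y1, y2)) := by
  rcases lt_trichotomy x1 y1 with h | h | h
  · simp [Prod.Lex.lt_iff, h]
  · simp [Prod.Lex.lt_iff, h]
  · simp [Prod.Lex.lt_iff, h, not_lt.2 (le_of_lt h), ne_of_gt h]

theorem pv_sorted2_eq_isort (tasks : List (List (String × String))) :
    sort_tasks_alt tasks =
      tasks.foldl (fun acc x =>
        PySem.List.insertBy (fun a b => decide (pvK2 a < pvK2 b)) x acc) [] := by
  unfold sort_tasks_alt PySem.List.sorted2
  simp only [if_neg (by decide : ¬ (false = true))]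
  congr 1
  funext acc x
  congr 1
  funext a b
  exact pv_lt_lex_bool (pvGet a "due_date") (pvGet b "due_date")
    (pvGet a "priority") (pvGet b "priority")

theorem pv_lex_le_of_eq_le {k1 k2 : Type} [LinearOrder k1] [LinearOrder k2]
    {x1 y1 : k1} {x2 y2 : k2} (h1 : x1 = y1) (h2 : x2 ≤ y2) :
    toLex (x1, x2) ≤ toLex (y1, y2) := by
  rcases eq_or_lt_of_le h2 with h | h
  · exact le_of_eq (by rw [h1, h])
  · exact le_of_lt (Prod.Lex.lt_iff.2 (Or.inr ⟨h1, h⟩))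

theorem pv_lex_le_of_lt {k1 k2 : Type} [LinearOrder k1] [LinearOrder k2]
    {x1 y1 : k1} {x2 y2 : k2} (h1 : x1 < y1) :
    toLex (x1, x2) ≤ toLex (y1, y2) :=
  le_of_lt (Prod.Lex.lt_iff.2 (Or.inl h1))

-- characterisation of the inner while loop
theorem pv_findEnd_eq (tasks : List (List (String × String))) (start : Nat) :
    ∀ e, pv_findEnd tasks start e = e + ((tasks.drop e).takeWhile
      (fun y => decide (pvGet y "due_date" = pvGet (tasks.getD start []) "due_date"))).length := by
  intro e
  fun_induction pv_findEnd with
  | case1 e h ih =>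
      rw [ih, List.drop_eq_getElem_cons h.1, List.takeWhile_cons_of_pos
        (by simpa [List.getD_eq_getElem?_getD, List.getElem?_eq_getElem h.1] using h.2)]
      simp; omega
  | case2 e h =>
      push Not at h
      by_cases he : e < tasks.length
      · rw [List.drop_eq_getElem_cons he, List.takeWhile_cons_of_neg
          (by simpa [List.getD_eq_getElem?_getD, List.getElem?_eq_getElem he] using h he)]
        simp
      · rw [List.drop_of_length_le (by omega)]; simp

-- what A's outer loop computes: process the equal-due_date runs of a due_date-sorted list in order
def pv_proc : List (List (String × String)) → List (List (String × String))
  | [] => []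
  | t :: rest =>
    (if rest.takeWhile (fun y => decide (pvGet y "due_date" = pvGet t "due_date")) = [] then
      t :: rest.takeWhile (fun y => decide (pvGet y "due_date" = pvGet t "due_date"))
    else pv_merge_sort
      (t :: rest.takeWhile (fun y => decide (pvGet y "due_date" = pvGet t "due_date"))) "priority") ++
      pv_proc (rest.dropWhile (fun y => decide (pvGet y "due_date" = pvGet t "due_date")))
termination_by l => l.length
decreasing_by exact Nat.lt_succ_of_le (List.dropWhile_sublist _).length_le

-- in a due_date-sorted list t :: rest, everything after the leading equal-due_date run is strictly later
theorem pv_dropWhile_gt (t : List (String × String)) (rest : List (List (String × String)))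
    (hp : (t :: rest).Pairwise (fun a b => pvGet a "due_date" ≤ pvGet b "due_date")) :
    ∀ y ∈ rest.dropWhile (fun y => decide (pvGet y "due_date" = pvGet t "due_date")),
      pvGet t "due_date" < pvGet y "due_date" := by
  induction rest with
  | nil => simp
  | cons r rs ih =>
    intro y hy
    rw [List.pairwise_cons] at hp
    by_cases hr : pvGet r "due_date" = pvGet t "due_date"
    · rw [List.dropWhile_cons_of_pos (by simp [hr])] at hy
      refine ih ?_ y hy
      rw [List.pairwise_cons]
      exact ⟨fun z hz => hp.1 z (List.mem_cons_of_mem r hz), (List.pairwise_cons.1 hp.2).2⟩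
    · rw [List.dropWhile_cons_of_neg (by simp [hr])] at hy
      have h1 : pvGet t "due_date" < pvGet r "due_date" :=
        lt_of_le_of_ne (hp.1 r (List.mem_cons_self ..)) (fun h => hr h.symm)
      rcases List.mem_cons.1 hy with hy | hy
      · exact hy ▸ h1
      · exact lt_of_lt_of_le h1 ((List.pairwise_cons.1 hp.2).1 y hy)

theorem pv_proc_perm (s : List (List (String × String))) : (pv_proc s).Perm s := by
  fun_induction pv_proc with
  | case1 => exact List.Perm.refl _
  | case2 t rest ih =>
    have h2 : ((t :: rest.takeWhile (fun y => decide (pvGet y "due_date" = pvGet t "due_date"))) ++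
        rest.dropWhile (fun y => decide (pvGet y "due_date" = pvGet t "due_date"))) = t :: rest := by
      rw [List.cons_append, List.takeWhile_append_dropWhile]
    refine List.Perm.trans (List.Perm.append ?_ ih) (by rw [h2])
    split
    · exact List.Perm.refl _
    · exact pv_merge_sort_perm _ _

theorem pv_proc_pairwise (s : List (List (String × String)))
    (hs : s.Pairwise (fun a b => pvGet a "due_date" ≤ pvGet b "due_date")) :
    (pv_proc s).Pairwise (fun a b => pvK2 a ≤ pvK2 b) := by
  fun_induction pv_proc with
  | case1 => exact List.Pairwise.nil
  | case2 t rest ih =>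
    have hrun : ∀ x ∈ (if rest.takeWhile
        (fun y => decide (pvGet y "due_date" = pvGet t "due_date")) = [] then
          t :: rest.takeWhile (fun y => decide (pvGet y "due_date" = pvGet t "due_date"))
        else pv_merge_sort (t :: rest.takeWhile
          (fun y => decide (pvGet y "due_date" = pvGet t "due_date"))) "priority"),
        pvGet x "due_date" = pvGet t "due_date" := by
      intro x hx
      have hx' : x ∈ t :: rest.takeWhile
          (fun y => decide (pvGet y "due_date" = pvGet t "due_date")) := by
        split at hx
        · exact hx
        · exact (pv_merge_sort_perm _ _).mem_iff.1 hx
      rcases List.mem_cons.1 hx' with h | h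
      · rw [h]
      · simpa using List.mem_takeWhile_imp h
    rw [List.pairwise_append]
    refine ⟨?_, ?_, ?_⟩
    · -- the processed run is pairwise under the composite key
      split
      · rename_i hw
        rw [hw]; exact List.pairwise_singleton _ _
      · refine (pv_merge_sort_pairwise _ "priority").imp_of_mem ?_
        intro a b ha hb hab
        have hka := (pv_merge_sort_perm _ _).mem_iff.1 ha
        have hkb := (pv_merge_sort_perm _ _).mem_iff.1 hb
        have h1 : pvGet a "due_date" = pvGet b "due_date" := by
          have h2 : ∀ z ∈ t :: rest.takeWhile
              (fun y => decide (pvGet y "due_date" = pvGet t "due_date")),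
              pvGet z "due_date" = pvGet t "due_date" := by
            intro z hz
            rcases List.mem_cons.1 hz with h | h
            · rw [h]
            · simpa using List.mem_takeWhile_imp h
          rw [h2 a hka, h2 b hkb]
        exact pv_lex_le_of_eq_le h1 hab
    · -- the recursively processed tail
      refine ih ?_
      have hsub : (rest.dropWhile (fun y => decide (pvGet y "due_date" = pvGet t "due_date"))).Sublist
          (t :: rest) := List.Sublist.trans (List.dropWhile_sublist _) (List.sublist_cons_self t rest)
      exact hs.sublist hsub
    · -- run elements come strictly before the tail in due_date
      intro a ha b hb
      have hka : pvGet a "due_date" = pvGet t "due_date" := hrun a ha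
      have hkb : pvGet t "due_date" < pvGet b "due_date" :=
        pv_dropWhile_gt t rest hs b ((pv_proc_perm _).mem_iff.1 hb)
      exact pv_lex_le_of_lt (by rw [hka]; exact hkb)

theorem pv_proc_filter (s : List (List (String × String)))
    (hs : s.Pairwise (fun a b => pvGet a "due_date" ≤ pvGet b "due_date"))
    (P : List (String × String) → Bool) (c : Lex (String × String))
    (hP : ∀ x, P x = true → pvK2 x = c) :
    (pv_proc s).filter P = s.filter P := by
  fun_induction pv_proc with
  | case1 => rfl
  | case2 t rest ih =>
    have hrest : (rest.dropWhile
        (fun y => decide (pvGet y "due_date" = pvGet t "due_date"))).Pairwise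
        (fun a b => pvGet a "due_date" ≤ pvGet b "due_date") :=
      hs.sublist (List.Sublist.trans (List.dropWhile_sublist _) (List.sublist_cons_self t rest))
    have hP2 : ∀ x, P x = true → pvGet x "priority" = (ofLex c).2 := by
      intro x hx
      have := hP x hx
      simpa using congrArg (fun z => (ofLex z).2) this
    rw [List.filter_append, ih hrest]
    have hQ : (if rest.takeWhile (fun y => decide (pvGet y "due_date" = pvGet t "due_date")) = []
        then t :: rest.takeWhile (fun y => decide (pvGet y "due_date" = pvGet t "due_date"))
        else pv_merge_sort (t :: rest.takeWhile
          (fun y => decide (pvGet y "due_date" = pvGet t "due_date"))) "priority").filter P =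
        (t :: rest.takeWhile (fun y => decide (pvGet y "due_date" = pvGet t "due_date"))).filter P := by
      split
      · rfl
      · exact pv_merge_sort_filter _ "priority" P ((ofLex c).2) hP2
    rw [hQ, ← List.filter_append, List.cons_append, List.takeWhile_append_dropWhile]

theorem pv_groupLoop_eq_proc : ∀ (n : Nat) (suf pre : List (List (String × String))),
    suf.length ≤ n →
    ((pre ++ suf).Pairwise (fun a b => pvGet a "due_date" ≤ pvGet b "due_date")) →
    (∀ x ∈ pre, ∀ y ∈ suf, pvGet x "due_date" ≠ pvGet y "due_date") →
    pv_groupLoop n (pre ++ suf) pre.length = pre ++ pv_proc suf := by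
  intro n
  induction n with
  | zero =>
    intro suf pre hn _ _
    have hsuf : suf = [] := List.length_eq_zero_iff.1 (Nat.le_zero.1 hn)
    subst hsuf
    simp [pv_groupLoop, pv_proc]
  | succ n ih =>
    intro suf pre hn hpair hbnd
    match suf with
    | [] =>
      simp [pv_groupLoop, pv_proc]
    | t :: rest =>
      have hstart : pre.length < (pre ++ t :: rest).length := by simp
      have hgetD : (pre ++ t :: rest).getD pre.length [] = t := by
        rw [List.getD_append_right _ _ _ _ (le_refl _)]
        simp
      have he : pv_findEnd (pre ++ t :: rest) pre.length pre.length =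
          pre.length + (1 + (rest.takeWhile
            (fun y => decide (pvGet y "due_date" = pvGet t "due_date"))).length) := by
        rw [pv_findEnd_eq, hgetD, List.drop_left, List.takeWhile_cons_of_pos (by simp)]
        simp; omega
      have hs2 : (t :: rest).Pairwise (fun a b => pvGet a "due_date" ≤ pvGet b "due_date") :=
        hpair.sublist (List.sublist_append_right pre _)
      have hrw : t :: rest = (t :: rest.takeWhile
          (fun y => decide (pvGet y "due_date" = pvGet t "due_date"))) ++
          rest.dropWhile (fun y => decide (pvGet y "due_date" = pvGet t "due_date")) := by
        rw [List.cons_append, List.takeWhile_append_dropWhile]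
      rw [pv_groupLoop]
      rw [if_pos hstart]
      simp only [he]
      by_cases hw : rest.takeWhile (fun y => decide (pvGet y "due_date" = pvGet t "due_date")) = []
      · -- singleton run: nothing is re-sorted
        rw [if_neg (by rw [hw]; simp)]
        have hassoc : pre ++ t :: rest = (pre ++ [t]) ++ rest := by simp
        have hlen1 : pre.length + (1 + (rest.takeWhile
            (fun y => decide (pvGet y "due_date" = pvGet t "due_date"))).length) =
            (pre ++ [t]).length := by rw [hw]; simp
        have hdropAll : rest.dropWhile
            (fun y => decide (pvGet y "due_date" = pvGet t "due_date")) = rest := by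
          conv_rhs => rw [← List.takeWhile_append_dropWhile
            (p := fun y => decide (pvGet y "due_date" = pvGet t "due_date")) (l := rest)]
          rw [hw, List.nil_append]
        rw [hlen1, hassoc, ih rest (pre ++ [t]) (by simpa using hn) (by rw [← hassoc]; exact hpair) ?_]
        · rw [pv_proc, if_pos hw, hw, hdropAll]
          simp
        · intro x hx y hy
          rcases List.mem_append.1 hx with hx | hx
          · exact hbnd x hx y (List.mem_cons_of_mem t hy)
          · have hxt : x = t := by simpa using hx
            subst hxt
            exact ne_of_lt (pv_dropWhile_gt x rest hs2 y (by rwa [hdropAll]))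
      · -- a run of length > 1 is re-sorted by priority
        have hwpos : 0 < (rest.takeWhile
            (fun y => decide (pvGet y "due_date" = pvGet t "due_date"))).length :=
          List.length_pos_iff.2 hw
        rw [if_pos (by omega), pv_spliceSorted]
        have htake : rest.take (rest.takeWhile
            (fun y => decide (pvGet y "due_date" = pvGet t "due_date"))).length =
            rest.takeWhile (fun y => decide (pvGet y "due_date" = pvGet t "due_date")) :=
          (List.prefix_iff_eq_take.1 (List.takeWhile_prefix _)).symm
        have hdrop : rest.drop (rest.takeWhile
            (fun y => decide (pvGet y "due_date" = pvGet t "due_date"))).length =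
            rest.dropWhile (fun y => decide (pvGet y "due_date" = pvGet t "due_date")) := by
          have h0 := List.drop_left
            (l₁ := rest.takeWhile (fun y => decide (pvGet y "due_date" = pvGet t "due_date")))
            (l₂ := rest.dropWhile (fun y => decide (pvGet y "due_date" = pvGet t "due_date")))
          rwa [List.takeWhile_append_dropWhile] at h0
        have hslice : PySem.List.slice (pre ++ t :: rest) (some (pre.length : Int))
            (some ((pre.length + (1 + (rest.takeWhile
              (fun y => decide (pvGet y "due_date" = pvGet t "due_date"))).length) : Nat)) :
              Option Int) = t :: rest.takeWhile
              (fun y => decide (pvGet y "due_date" = pvGet t "due_date")) := by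
          rw [PySem.List.slice_natCast, List.drop_left]
          have : pre.length + (1 + (rest.takeWhile
              (fun y => decide (pvGet y "due_date" = pvGet t "due_date"))).length) - pre.length =
              (rest.takeWhile (fun y => decide (pvGet y "due_date" = pvGet t "due_date"))).length
                + 1 := by omega
          rw [this, List.take_succ_cons, htake]
        have hdropE : (pre ++ t :: rest).drop (pre.length + (1 + (rest.takeWhile
            (fun y => decide (pvGet y "due_date" = pvGet t "due_date"))).length)) =
            rest.dropWhile (fun y => decide (pvGet y "due_date" = pvGet t "due_date")) := by
          rw [List.drop_append]
          rw [List.drop_of_length_le (by omega)]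
          have : pre.length + (1 + (rest.takeWhile
              (fun y => decide (pvGet y "due_date" = pvGet t "due_date"))).length) - pre.length =
              (rest.takeWhile (fun y => decide (pvGet y "due_date" = pvGet t "due_date"))).length
                + 1 := by omega
          rw [this, List.nil_append, List.drop_succ_cons, hdrop]
        rw [List.take_left, hslice, hdropE]
        -- now the recursive call on pre ++ Q ++ dropWhile …
        have hmemQ : ∀ x ∈ pv_merge_sort (t :: rest.takeWhile
            (fun y => decide (pvGet y "due_date" = pvGet t "due_date"))) "priority",
            pvGet x "due_date" = pvGet t "due_date" := by
          intro x hx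
          rcases List.mem_cons.1 ((pv_merge_sort_perm _ _).mem_iff.1 hx) with h | h
          · rw [h]
          · simpa using List.mem_takeWhile_imp h
        have hQlen : (pv_merge_sort (t :: rest.takeWhile
            (fun y => decide (pvGet y "due_date" = pvGet t "due_date"))) "priority").length =
            1 + (rest.takeWhile
              (fun y => decide (pvGet y "due_date" = pvGet t "due_date"))).length := by
          rw [pv_merge_sort_length]; simp; omega
        have hlen2 : pre.length + (1 + (rest.takeWhile
            (fun y => decide (pvGet y "due_date" = pvGet t "due_date"))).length) =
            (pre ++ pv_merge_sort (t :: rest.takeWhile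
              (fun y => decide (pvGet y "due_date" = pvGet t "due_date"))) "priority").length := by
          rw [List.length_append, hQlen]
        -- pairwise decomposition of the original list
        have hpair' : ((pre ++ (t :: rest.takeWhile
            (fun y => decide (pvGet y "due_date" = pvGet t "due_date")))) ++
            rest.dropWhile (fun y => decide (pvGet y "due_date" = pvGet t "due_date"))).Pairwise
            (fun a b => pvGet a "due_date" ≤ pvGet b "due_date") := by
          rw [List.append_assoc, ← hrw]; exact hpair
        rw [List.pairwise_append] at hpair'
        have hpre_run := (List.pairwise_append.1 hpair'.1)
        have hnew : ((pre ++ pv_merge_sort (t :: rest.takeWhile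
            (fun y => decide (pvGet y "due_date" = pvGet t "due_date"))) "priority") ++
            rest.dropWhile (fun y => decide (pvGet y "due_date" = pvGet t "due_date"))).Pairwise
            (fun a b => pvGet a "due_date" ≤ pvGet b "due_date") := by
          rw [List.pairwise_append]
          refine ⟨?_, hpair'.2.1, ?_⟩
          · rw [List.pairwise_append]
            refine ⟨hpre_run.1, ?_, ?_⟩
            · refine List.pairwise_of_forall_mem_list ?_
              intro a ha b hb
              rw [hmemQ a ha, hmemQ b hb]
            · intro a ha b hb
              exact hpre_run.2.2 a ha _ ((pv_merge_sort_perm _ _).mem_iff.1 hb)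
          · intro a ha b hb
            rcases List.mem_append.1 ha with ha | ha
            · exact hpair'.2.2 a (List.mem_append_left _ ha) b hb
            · rw [hmemQ a ha]
              exact hpair'.2.2 t (List.mem_append_right _ (List.mem_cons_self ..)) b hb
        have hbnd2 : ∀ x ∈ pre ++ pv_merge_sort (t :: rest.takeWhile
            (fun y => decide (pvGet y "due_date" = pvGet t "due_date"))) "priority",
            ∀ y ∈ rest.dropWhile (fun y => decide (pvGet y "due_date" = pvGet t "due_date")),
            pvGet x "due_date" ≠ pvGet y "due_date" := by
          intro x hx y hy
          rcases List.mem_append.1 hx with hx | hx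
          · exact hbnd x hx y (List.mem_cons_of_mem t ((List.dropWhile_sublist _).mem hy))
          · rw [hmemQ x hx]
            exact ne_of_lt (pv_dropWhile_gt t rest hs2 y hy)
        have hdlen : (rest.dropWhile
            (fun y => decide (pvGet y "due_date" = pvGet t "due_date"))).length ≤ n := by
          have := (List.dropWhile_sublist
            (fun y => decide (pvGet y "due_date" = pvGet t "due_date")) (l := rest)).length_le
          simp at hn; omega
        rw [hlen2, ih _ _ hdlen hnew hbnd2, pv_proc, if_neg hw]
        simp

theorem sort_tasks_eq_alt (tasks : List (List (String × String))) :
    sort_tasks tasks = sort_tasks_alt tasks := by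
  have hs := pv_merge_sort_pairwise tasks "due_date"
  have h1 : sort_tasks tasks = pv_proc (pv_merge_sort tasks "due_date") := by
    unfold sort_tasks
    have h0 := pv_groupLoop_eq_proc (pv_merge_sort tasks "due_date").length
      (pv_merge_sort tasks "due_date") [] le_rfl (by simpa using hs) (by simp)
    simpa using h0
  rw [h1, pv_sorted2_eq_isort]
  refine pv_stable_unique pvK2 _ _ ?_ ?_ ?_ ?_
  · exact ((pv_proc_perm _).trans (pv_merge_sort_perm tasks "due_date")).trans
      (by simpa using (pv_isort_perm (fun a b => decide (pvK2 a < pvK2 b)) tasks []).symm)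
  · exact pv_proc_pairwise _ hs
  · exact pv_isort_pairwise pvK2 tasks [] List.Pairwise.nil
  · intro c
    have hP : ∀ a, (fun x => decide (pvK2 x = c)) a = true → pvK2 a = c :=
      fun a ha => of_decide_eq_true ha
    rw [pv_proc_filter _ hs _ c hP,
      pv_merge_sort_filter tasks "due_date" _ ((ofLex c).1)
        (fun x hx => by simpa [pvK2, pvGet] using congrArg (fun z => (ofLex z).1) (hP x hx)),
      pv_isort_filter pvK2 _ c hP tasks [] List.Pairwise.nil]
    simp

-- ===== VERDICT (by name: the statement is the Claim_ definition above) =====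
theorem sort_tasks_spec : Claim_equal_sort_tasks := by
  intro tasks _ _
  exact sort_tasks_eq_alt tasks
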